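-- pv_equiv track=rewrite | github.com/clear-reasoning/CLEAR | trajectory/env/planners.py | simlified_inverse_pems_bn_identify
-- ===== SOURCE A (Python) =====
-- from copy import deepcopy
--
-- def simlified_inverse_pems_bn_identify(inrix, v_diff=4):
--     """Identify bottleneck with simplified inverse PeMS."""
--     bn_inrix = deepcopy(inrix)
--     for i in range(len(inrix)-1, 0, -1):
--         if_bn = False
--         if inrix[i] <= 60:
--             if inrix[i] - inrix[i-1] > v_diff:
--                 if_bn = True
--                 bn_inrix[i] = False
--         bn_inrix[i-1] = if_bn
--     bn_inrix[0] = False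
--     bn_inrix[len(inrix)-1] = False
--
--     return bn_inrix
-- ===== SOURCE B (Python) =====
-- def simlified_inverse_pems_bn_identify(inrix, v_diff=4):
--     """Identify bottleneck with simplified inverse PeMS (forward table + shift)."""
--     n = len(inrix)
--     # cond[j]: the speed-drop condition between positions j and j+1
--     cond = [inrix[j + 1] <= 60 and inrix[j + 1] - inrix[j] > v_diff
--             for j in range(n - 1)]
--     if n == 0:
--         return []
--     if n == 1:
--         return [False]
--     # a bottleneck at interior p: the condition fires at p but not at p-1
--     return [False] + [cond[p] and not cond[p - 1] for p in range(1, n - 1)] + [False]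
-- ===== Notes on version B (the rewrite author's own statement) =====
-- stated objective: alternative
-- what changed: A walks the array backwards with overlapping in-place overwrites of a deep copy; B does a forward pass building a boolean speed-drop table cond and then emits each interior position as cond[p] and not cond[p-1], with constant False at both ends.
-- crash fix: On the empty list A raises IndexError at the trailing boundary assignments, while B returns the empty list. — e.g. on simlified_inverse_pems_bn_identify([], 4): A raises IndexError, B returns []
import Mathlib
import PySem

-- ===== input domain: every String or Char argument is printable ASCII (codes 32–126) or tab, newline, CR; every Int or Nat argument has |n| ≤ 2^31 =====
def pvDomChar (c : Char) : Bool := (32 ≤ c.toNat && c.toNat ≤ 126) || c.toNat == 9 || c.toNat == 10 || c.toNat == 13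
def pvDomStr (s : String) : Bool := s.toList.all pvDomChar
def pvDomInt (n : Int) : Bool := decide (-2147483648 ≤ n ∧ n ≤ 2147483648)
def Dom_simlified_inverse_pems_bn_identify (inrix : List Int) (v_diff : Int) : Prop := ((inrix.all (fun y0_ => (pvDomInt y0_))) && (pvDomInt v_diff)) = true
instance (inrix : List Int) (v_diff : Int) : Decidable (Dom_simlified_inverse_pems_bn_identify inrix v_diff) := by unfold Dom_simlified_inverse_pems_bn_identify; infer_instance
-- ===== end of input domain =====

-- B replaces A's backward loop with overlapping in-place overwrites by a forward boolean
-- table plus a shifted scan (alternative decomposition, same O(n) cost); return-value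
-- equivalence only (A mutates only its own deepcopy, so no caller-visible side effects).

-- ===== PORT A =====
-- the loop body of A's backward for-loop (i is the Python loop index, an Int)
def pvBodyA (v_diff : Int) (inrix : List Int) (bn : List Bool) (i : Int) : List Bool :=
  -- inrix[i], inrix[i-1]: the loop only visits i ∈ [1, len-1], so both indices are in
  -- range and pyGetD is exact there
  let xi := PySem.List.pyGetD inrix i 0
  let xim := PySem.List.pyGetD inrix (i - 1) 0
  -- the nested ifs: if_bn becomes True and bn[i] is set to False exactly when both tests pass
  let if_bn : Bool := decide (xi ≤ 60 ∧ xi - xim > v_diff)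
  let bn := if xi ≤ 60 ∧ xi - xim > v_diff then bn.set i.toNat false else bn
  bn.set (i - 1).toNat if_bn

def simlified_inverse_pems_bn_identify (inrix : List Int) (v_diff : Int) : List Bool :=
  -- bn_inrix = deepcopy(inrix): under Pre_ (inrix ≠ []) every entry of the copy is
  -- overwritten before return, so the copy is modelled as a same-length Bool list
  let bn0 : List Bool := inrix.map (fun _ => false)
  let bn := (PySem.List.pyRange ((inrix.length : Int) - 1) 0 (-1)).foldl (pvBodyA v_diff inrix) bn0
  let bn := bn.set 0 false
  bn.set (inrix.length - 1) false

-- ===== PORT B =====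
def simlified_inverse_pems_bn_identify_alt (inrix : List Int) (v_diff : Int) : List Bool :=
  let n := inrix.length
  -- cond[j] for j in range(n-1); all indices below are in range, so getD is exact
  let cond : List Bool := (List.range (n - 1)).map (fun j =>
    decide (inrix.getD (j + 1) 0 ≤ 60) && decide (inrix.getD (j + 1) 0 - inrix.getD j 0 > v_diff))
  if n = 0 then []
  else if n = 1 then [false]
  else [false] ++ (List.range' 1 (n - 2)).map
         (fun p => cond.getD p false && !cond.getD (p - 1) false) ++ [false]

-- ===== PRECONDITION & SPEC =====
-- Pre_ excludes only the empty list, on which A raises IndexError at the trailing boundary assignments.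
def Pre_simlified_inverse_pems_bn_identify (inrix : List Int) (v_diff : Int) : Prop := inrix ≠ []
instance (inrix : List Int) (v_diff : Int) : Decidable (Pre_simlified_inverse_pems_bn_identify inrix v_diff) := by unfold Pre_simlified_inverse_pems_bn_identify; infer_instance
def pvWitness_simlified_inverse_pems_bn_identify : List Int × Int := ([50, 30, 70, 20], 4)

-- On the empty list A raises IndexError while B returns the empty list.
def Raises_simlified_inverse_pems_bn_identify (inrix : List Int) (v_diff : Int) : Prop := inrix = []
instance (inrix : List Int) (v_diff : Int) : Decidable (Raises_simlified_inverse_pems_bn_identify inrix v_diff) := by unfold Raises_simlified_inverse_pems_bn_identify; infer_instance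
def pvRaiseWitness_simlified_inverse_pems_bn_identify : List Int × Int := ([], 4)
def pvRaiseWitnessOut_simlified_inverse_pems_bn_identify : List Bool := []

def Spec_simlified_inverse_pems_bn_identify (inrix : List Int) (v_diff : Int) (out : List Bool) : Prop := out = simlified_inverse_pems_bn_identify_alt inrix v_diff
instance (inrix : List Int) (v_diff : Int) (out : List Bool) : Decidable (Spec_simlified_inverse_pems_bn_identify inrix v_diff out) := by unfold Spec_simlified_inverse_pems_bn_identify; infer_instance

-- ===== CLAIM (what is proved, stated in full; the proofs are below) =====
def Claim_equal_simlified_inverse_pems_bn_identify : Prop := ∀ (inrix : List Int) (v_diff : Int), Dom_simlified_inverse_pems_bn_identify inrix v_diff → Pre_simlified_inverse_pems_bn_identify inrix v_diff → Spec_simlified_inverse_pems_bn_identify inrix v_diff (simlified_inverse_pems_bn_identify inrix v_diff)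
def Claim_raises_simlified_inverse_pems_bn_identify : Prop := (∀ (inrix : List Int) (v_diff : Int), Dom_simlified_inverse_pems_bn_identify inrix v_diff → Raises_simlified_inverse_pems_bn_identify inrix v_diff → ¬ Pre_simlified_inverse_pems_bn_identify inrix v_diff) ∧ (Dom_simlified_inverse_pems_bn_identify (pvRaiseWitness_simlified_inverse_pems_bn_identify.1) (pvRaiseWitness_simlified_inverse_pems_bn_identify.2) ∧ Raises_simlified_inverse_pems_bn_identify (pvRaiseWitness_simlified_inverse_pems_bn_identify.1) (pvRaiseWitness_simlified_inverse_pems_bn_identify.2) ∧ simlified_inverse_pems_bn_identify_alt (pvRaiseWitness_simlified_inverse_pems_bn_identify.1) (pvRaiseWitness_simlified_inverse_pems_bn_identify.2) = pvRaiseWitnessOut_simlified_inverse_pems_bn_identify)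

-- ===== LEMMAS AND PROOFS =====

-- the per-index speed-drop condition, c k ↔ "inrix[k] <= 60 and inrix[k]-inrix[k-1] > v_diff"
def condN (inrix : List Int) (v_diff : Int) (k : Nat) : Bool :=
  decide (inrix.getD k 0 ≤ 60) && decide (inrix.getD k 0 - inrix.getD (k - 1) 0 > v_diff)

theorem bodyA_length (v_diff : Int) (inrix : List Int) (bn : List Bool) (i : Int) :
    (pvBodyA v_diff inrix bn i).length = bn.length := by
  unfold pvBodyA
  dsimp only
  split <;> simp

theorem bodyA_char (v_diff : Int) (inrix : List Int) (bn : List Bool) (m : Nat)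
    (hm : m + 1 < bn.length) :
    (∀ k, k ≠ m → k ≠ m + 1 → (pvBodyA v_diff inrix bn ((m : Int) + 1))[k]? = bn[k]?) ∧
    (pvBodyA v_diff inrix bn ((m : Int) + 1))[m]? = some (condN inrix v_diff (m + 1)) ∧
    (condN inrix v_diff (m + 1) = true →
      (pvBodyA v_diff inrix bn ((m : Int) + 1))[m + 1]? = some false) ∧
    (condN inrix v_diff (m + 1) = false →
      (pvBodyA v_diff inrix bn ((m : Int) + 1))[m + 1]? = bn[m + 1]?) := by
  have hxi : PySem.List.pyGetD inrix ((m : Int) + 1) 0 = inrix.getD (m + 1) 0 := by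
    have h : ((m : Int) + 1) = ((m + 1 : Nat) : Int) := by push_cast; ring
    rw [h, PySem.List.pyGetD_natCast]
  have hxim : PySem.List.pyGetD inrix ((m : Int) + 1 - 1) 0 = inrix.getD m 0 := by
    have h : ((m : Int) + 1 - 1) = ((m : Nat) : Int) := by ring
    rw [h, PySem.List.pyGetD_natCast]
  have ht1 : ((m : Int) + 1).toNat = m + 1 := by omega
  have ht2 : ((m : Int) + 1 - 1).toNat = m := by omega
  have hcond : condN inrix v_diff (m + 1) =
      decide (inrix.getD (m + 1) 0 ≤ 60 ∧ inrix.getD (m + 1) 0 - inrix.getD m 0 > v_diff) := by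
    simp [condN]
  unfold pvBodyA
  rw [hxi, hxim, ht1, ht2]
  dsimp only
  by_cases hp : inrix.getD (m + 1) 0 ≤ 60 ∧ inrix.getD (m + 1) 0 - inrix.getD m 0 > v_diff
  · rw [if_pos hp]
    have hdec : decide (inrix.getD (m + 1) 0 ≤ 60 ∧
        inrix.getD (m + 1) 0 - inrix.getD m 0 > v_diff) = true := decide_eq_true hp
    refine ⟨?_, ?_, ?_, ?_⟩
    · intro k hk1 hk2
      rw [List.getElem?_set_ne (by omega), List.getElem?_set_ne (by omega)]
    · rw [List.getElem?_set_self (by simp; omega), hcond, hdec]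
    · intro _
      rw [List.getElem?_set_ne (by omega), List.getElem?_set_self (by omega)]
    · intro hfalse
      rw [hcond, hdec] at hfalse
      cases hfalse
  · rw [if_neg hp]
    have hdec : decide (inrix.getD (m + 1) 0 ≤ 60 ∧
        inrix.getD (m + 1) 0 - inrix.getD m 0 > v_diff) = false := decide_eq_false hp
    refine ⟨?_, ?_, ?_, ?_⟩
    · intro k hk1 hk2
      rw [List.getElem?_set_ne (by omega)]
    · rw [List.getElem?_set_self (by omega), hcond, hdec]
    · intro htrue
      rw [hcond, hdec] at htrue
      cases htrue
    · intro _
      rw [List.getElem?_set_ne (by omega)]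

def loopA (v_diff : Int) (inrix : List Int) (m : Nat) (bn : List Bool) : List Bool :=
  (PySem.List.pyRange (m : Int) 0 (-1)).foldl (pvBodyA v_diff inrix) bn

theorem loopA_zero (v_diff : Int) (inrix : List Int) (bn : List Bool) :
    loopA v_diff inrix 0 bn = bn := by
  unfold loopA
  rw [show ((0 : Nat) : Int) = 0 by norm_num,
      PySem.List.pyRange_neg_one_eq_nil (le_refl (0 : Int))]
  rfl

theorem loopA_succ (v_diff : Int) (inrix : List Int) (m : Nat) (bn : List Bool) :
    loopA v_diff inrix (m + 1) bn =
      loopA v_diff inrix m (pvBodyA v_diff inrix bn ((m : Int) + 1)) := by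
  unfold loopA
  rw [show ((m + 1 : Nat) : Int) = (m : Int) + 1 by push_cast; ring,
      PySem.List.pyRange_neg_one_cons (by omega), List.foldl_cons,
      show ((m : Int) + 1 - 1) = (m : Int) by ring]

theorem loopA_char (v_diff : Int) (inrix : List Int) (m : Nat) :
    ∀ (bn : List Bool), m < bn.length →
    (loopA v_diff inrix m bn).length = bn.length ∧
    (∀ k, m < k → (loopA v_diff inrix m bn)[k]? = bn[k]?) ∧
    (∀ k, 1 ≤ k → k < m → (loopA v_diff inrix m bn)[k]? =
        some (condN inrix v_diff (k + 1) && !condN inrix v_diff k)) ∧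
    (1 ≤ m → (loopA v_diff inrix m bn)[m]? =
        some (if condN inrix v_diff m = true then false else bn.getD m false)) ∧
    (1 ≤ m → (loopA v_diff inrix m bn)[0]? = some (condN inrix v_diff 1)) := by
  induction m with
  | zero =>
    intro bn _
    refine ⟨by rw [loopA_zero], fun k _ => by rw [loopA_zero],
           fun k h1 h2 => absurd h2 (by omega),
           fun h => absurd h (by omega), fun h => absurd h (by omega)⟩
  | succ m ih =>
    intro bn hm
    obtain ⟨B1, B2, B3, B4⟩ := bodyA_char v_diff inrix bn m hm
    have hlen' : (pvBodyA v_diff inrix bn ((m : Int) + 1)).length = bn.length :=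
      bodyA_length v_diff inrix bn ((m : Int) + 1)
    obtain ⟨L1, L2, L3, L4, L5⟩ := ih (pvBodyA v_diff inrix bn ((m : Int) + 1)) (by omega)
    rw [loopA_succ]
    refine ⟨L1.trans hlen', ?_, ?_, ?_, ?_⟩
    · intro k hk
      rw [L2 k (by omega), B1 k (by omega) (by omega)]
    · intro k hk1 hk2
      by_cases hkm : k < m
      · exact L3 k hk1 hkm
      · have hkm' : k = m := by omega
        rw [hkm', L4 (by omega)]
        have hgd : (pvBodyA v_diff inrix bn ((m : Int) + 1)).getD m false =
            condN inrix v_diff (m + 1) := by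
          rw [List.getD_eq_getElem?_getD, B2]
          rfl
        rw [hgd]
        by_cases hc : condN inrix v_diff m = true
        · simp [hc]
        · simp [hc]
    · intro _
      rw [L2 (m + 1) (by omega)]
      by_cases hc : condN inrix v_diff (m + 1) = true
      · rw [B3 hc, hc, if_pos rfl]
      · have hc' : condN inrix v_diff (m + 1) = false := by
          cases h : condN inrix v_diff (m + 1)
          · rfl
          · exact absurd h hc
        rw [B4 hc', hc', if_neg (by simp)]
        rw [List.getD_eq_getElem?_getD, List.getElem?_eq_getElem hm]
        rfl
    · intro _
      by_cases hm0 : 1 ≤ m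
      · exact L5 hm0
      · have : m = 0 := by omega
        subst this
        rw [loopA_zero]
        exact B2

theorem portA_eq_loopA (inrix : List Int) (v_diff : Int) (h : inrix ≠ []) :
    simlified_inverse_pems_bn_identify inrix v_diff =
      ((loopA v_diff inrix (inrix.length - 1) (inrix.map fun _ => false)).set 0 false).set
        (inrix.length - 1) false := by
  have hlen : 1 ≤ inrix.length := List.length_pos_of_ne_nil h
  unfold simlified_inverse_pems_bn_identify loopA
  dsimp only
  rw [show ((inrix.length : Int) - 1) = ((inrix.length - 1 : Nat) : Int) by omega]

theorem portA_length (inrix : List Int) (v_diff : Int) (h : inrix ≠ []) :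
    (simlified_inverse_pems_bn_identify inrix v_diff).length = inrix.length := by
  have hlen : 1 ≤ inrix.length := List.length_pos_of_ne_nil h
  obtain ⟨L1, _, _, _, _⟩ := loopA_char v_diff inrix (inrix.length - 1)
    (inrix.map fun _ => false) (by simp only [List.length_map]; omega)
  rw [portA_eq_loopA inrix v_diff h]
  simp only [List.length_set, L1, List.length_map]

theorem portA_char (inrix : List Int) (v_diff : Int) (h : inrix ≠ []) (k : Nat)
    (hk : k < inrix.length) :
    (simlified_inverse_pems_bn_identify inrix v_diff)[k]? =
      some (if k = 0 ∨ k = inrix.length - 1 then false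
            else condN inrix v_diff (k + 1) && !condN inrix v_diff k) := by
  have hlen : 1 ≤ inrix.length := List.length_pos_of_ne_nil h
  obtain ⟨L1, L2, L3, L4, L5⟩ := loopA_char v_diff inrix (inrix.length - 1)
    (inrix.map fun _ => false) (by simp only [List.length_map]; omega)
  have hLlen : (loopA v_diff inrix (inrix.length - 1) (inrix.map fun _ => false)).length
      = inrix.length := by simp only [L1, List.length_map]
  rw [portA_eq_loopA inrix v_diff h]
  by_cases hk1 : k = inrix.length - 1
  · rw [hk1, List.getElem?_set_self (by simp only [List.length_set, hLlen]; omega),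
        if_pos (Or.inr rfl)]
  · rw [List.getElem?_set_ne (by omega)]
    by_cases hk0 : k = 0
    · rw [hk0, List.getElem?_set_self (by simp only [hLlen]; omega), if_pos (Or.inl rfl)]
    · rw [List.getElem?_set_ne (by omega), L3 k (by omega) (by omega),
          if_neg (by omega)]

theorem condTbl_getD (inrix : List Int) (v_diff : Int) (p : Nat) (hp : p < inrix.length - 1) :
    ((List.range (inrix.length - 1)).map (fun j =>
      decide (inrix.getD (j + 1) 0 ≤ 60) &&
      decide (inrix.getD (j + 1) 0 - inrix.getD j 0 > v_diff))).getD p false =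
    condN inrix v_diff (p + 1) := by
  rw [List.getD_eq_getElem?_getD, List.getElem?_map, List.getElem?_range hp]
  simp [condN]

theorem portB_length (inrix : List Int) (v_diff : Int) (h : inrix ≠ []) :
    (simlified_inverse_pems_bn_identify_alt inrix v_diff).length = inrix.length := by
  have hlen : 1 ≤ inrix.length := List.length_pos_of_ne_nil h
  unfold simlified_inverse_pems_bn_identify_alt
  dsimp only
  by_cases h1 : inrix.length = 1
  · rw [if_neg (by omega), if_pos h1, h1]
    rfl
  · rw [if_neg (by omega), if_neg h1]
    simp only [List.length_append, List.length_map, List.length_range', List.length_cons,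
      List.length_nil]
    omega

theorem portB_char (inrix : List Int) (v_diff : Int) (h : inrix ≠ []) (k : Nat)
    (hk : k < inrix.length) :
    (simlified_inverse_pems_bn_identify_alt inrix v_diff)[k]? =
      some (if k = 0 ∨ k = inrix.length - 1 then false
            else condN inrix v_diff (k + 1) && !condN inrix v_diff k) := by
  have hlen : 1 ≤ inrix.length := List.length_pos_of_ne_nil h
  unfold simlified_inverse_pems_bn_identify_alt
  dsimp only
  by_cases h1 : inrix.length = 1
  · rw [if_neg (by omega), if_pos h1]
    have hk0 : k = 0 := by omega
    rw [hk0, if_pos (Or.inl rfl)]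
    rfl
  · rw [if_neg (by omega), if_neg h1]
    by_cases hk0 : k = 0
    · rw [hk0, if_pos (Or.inl rfl)]
      rfl
    · obtain ⟨j, rfl⟩ : ∃ j, k = j + 1 := ⟨k - 1, by omega⟩
      have hmidlen : ((List.range' 1 (inrix.length - 2)).map (fun p =>
          ((List.range (inrix.length - 1)).map (fun j =>
            decide (inrix.getD (j + 1) 0 ≤ 60) &&
            decide (inrix.getD (j + 1) 0 - inrix.getD j 0 > v_diff))).getD p false &&
          !((List.range (inrix.length - 1)).map (fun j =>
            decide (inrix.getD (j + 1) 0 ≤ 60) &&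
            decide (inrix.getD (j + 1) 0 - inrix.getD j 0 > v_diff))).getD (p - 1) false)).length
          = inrix.length - 2 := by
        simp only [List.length_map, List.length_range']
      simp only [List.cons_append, List.nil_append, List.getElem?_cons_succ]
      by_cases hkl : j + 1 = inrix.length - 1
      · rw [List.getElem?_append_right (by rw [hmidlen]; omega), hmidlen,
            if_pos (Or.inr hkl)]
        have : j - (inrix.length - 2) = 0 := by omega
        rw [this]
        rfl
      · rw [List.getElem?_append_left (by rw [hmidlen]; omega), List.getElem?_map,
            List.getElem?_range' (by omega : j < inrix.length - 2)]
        simp only [Option.map_some]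
        have hstep : 1 + 1 * j = 1 + j := by omega
        rw [hstep, condTbl_getD inrix v_diff (1 + j) (by omega)]
        have hj : 1 + j - 1 = j := by omega
        rw [hj, condTbl_getD inrix v_diff j (by omega)]
        rw [if_neg (by omega)]
        have : 1 + j + 1 = j + 1 + 1 := by omega
        rw [this]

-- ===== VERDICT (by name: the statement is the Claim_ definition above) =====
theorem simlified_inverse_pems_bn_identify_spec : Claim_equal_simlified_inverse_pems_bn_identify := by
  intro inrix v_diff _ hpre
  unfold Spec_simlified_inverse_pems_bn_identify
  apply List.ext_getElem?
  intro k
  by_cases hk : k < inrix.length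
  · rw [portA_char inrix v_diff hpre k hk, portB_char inrix v_diff hpre k hk]
  · rw [List.getElem?_eq_none, List.getElem?_eq_none]
    · rw [portB_length inrix v_diff hpre]; omega
    · rw [portA_length inrix v_diff hpre]; omega

@[simp] theorem simlified_inverse_pems_bn_identify_raises : Claim_raises_simlified_inverse_pems_bn_identify := by
  unfold Claim_raises_simlified_inverse_pems_bn_identify
  exact ⟨fun inrix v_diff _ hr => by simp [Raises_simlified_inverse_pems_bn_identify] at hr
                                     simp [Pre_simlified_inverse_pems_bn_identify, hr], by decide⟩
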